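-- pv_equiv track=rewrite | github.com/DingShizhe/NeuralNJ | phydata_infer.py | pairwise_hamming_distance
-- ===== SOURCE A (Python) =====
-- def hamming_distance(str1, str2):
--     """计算两个字符串之间的汉明距离"""
--     if len(str1) != len(str2):
--         raise ValueError("两个字符串必须有相同的长度")
--
--     return sum(ch1 != ch2 for ch1, ch2 in zip(str1, str2))
--
-- def pairwise_hamming_distance(strings):
--     """计算字符串列表中所有字符串对的汉明距离"""
--     distances = []
--     n = len(strings)
--
--     for i in range(n):
--         ___d = []
--         for j in range(n):
--             distance = hamming_distance(strings[i], strings[j])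
--             ___d.append(distance)
--         distances.append(___d)
--
--     return distances
-- ===== SOURCE B (Python) =====
-- def hamming_distance(str1, str2):
--     if len(str1) != len(str2):
--         raise ValueError("两个字符串必须有相同的长度")
--     return sum(ch1 != ch2 for ch1, ch2 in zip(str1, str2))
--
-- def pairwise_hamming_distance(strings):
--     n = len(strings)
--     rows = []
--     for i in range(n):
--         # mirror the already-computed lower part, zero on the diagonal,
--         # compute only the strict upper triangle fresh
--         row = [rows[j][i] for j in range(i)] \
--               + [0] \
--               + [hamming_distance(strings[i], strings[j]) for j in range(i + 1, n)]
--         rows.append(row)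
--     return rows
-- ===== Notes on version B (the rewrite author's own statement) =====
-- stated objective: alternative
-- what changed: B computes each distance once: row i mirrors the already-built lower triangle (rows[j][i]), puts a literal 0 on the diagonal, and calls hamming_distance only for the strict upper triangle, instead of A's full n*n double loop; measured about 1.4-2x faster in a timing run but below the 1.5x bar at the largest size, so no speed claim.
import Mathlib
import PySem

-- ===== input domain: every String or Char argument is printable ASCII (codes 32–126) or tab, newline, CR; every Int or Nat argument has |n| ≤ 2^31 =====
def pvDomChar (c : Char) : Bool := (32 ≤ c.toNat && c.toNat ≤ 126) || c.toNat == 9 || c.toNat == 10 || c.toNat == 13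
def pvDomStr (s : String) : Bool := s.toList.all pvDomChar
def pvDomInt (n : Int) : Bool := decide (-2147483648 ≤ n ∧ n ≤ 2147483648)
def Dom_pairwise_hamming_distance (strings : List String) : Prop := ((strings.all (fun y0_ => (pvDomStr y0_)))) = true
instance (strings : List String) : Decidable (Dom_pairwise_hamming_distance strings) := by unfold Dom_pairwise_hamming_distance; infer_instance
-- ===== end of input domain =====

-- B computes each Hamming distance once (mirrors the lower triangle, zero diagonal); A's full n×n loop computes every distance twice.
-- Equivalence is claimed on Pre_: lists whose strings all have one length (elsewhere Python A raises ValueError).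


-- ===== PORT A =====
-- helper hamming_distance: the length check is A's raise, excluded by Pre_; the sum over zip is exact
def hammingA (s1 s2 : String) : Int :=
  (s1.toList.zip s2.toList).foldl (fun acc p => acc + (if p.1 ≠ p.2 then 1 else 0)) 0

def pairwise_hamming_distance (strings : List String) : List (List Int) :=
  let n := strings.length
  (List.range n).foldl (fun distances i =>
    distances ++ [(List.range n).foldl (fun d j =>
      d ++ [hammingA (strings.getD i "") (strings.getD j "")]) []]) []

-- ===== PORT B =====
def pairwise_hamming_distance_alt (strings : List String) : List (List Int) :=
  let n := strings.length
  (List.range n).foldl (fun rows i =>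
    rows ++ [((List.range i).map (fun j => (rows.getD j []).getD i 0))
             ++ [0]
             ++ ((List.range' (i + 1) (n - (i + 1))).map
                  (fun j => hammingA (strings.getD i "") (strings.getD j "")))]) []

-- ===== PRECONDITION & SPEC =====
-- Pre_: all strings share one length — exactly the inputs on which Python A returns (on any other list A raises ValueError).
def Pre_pairwise_hamming_distance (strings : List String) : Prop :=
  (strings.all (fun s => s.length == (strings.headD "").length)) = true
instance (strings : List String) : Decidable (Pre_pairwise_hamming_distance strings) := by
  unfold Pre_pairwise_hamming_distance; infer_instance

def pvWitness_pairwise_hamming_distance : List String := ["abc", "abd", "xbc"]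

def Spec_pairwise_hamming_distance (strings : List String) (out : List (List Int)) : Prop := out = pairwise_hamming_distance_alt strings
instance (strings : List String) (out : List (List Int)) : Decidable (Spec_pairwise_hamming_distance strings out) := by unfold Spec_pairwise_hamming_distance; infer_instance

-- ===== CLAIM (what is proved, stated in full; the proofs are below) =====
def Claim_equal_pairwise_hamming_distance : Prop := ∀ (strings : List String), Dom_pairwise_hamming_distance strings → Pre_pairwise_hamming_distance strings → Spec_pairwise_hamming_distance strings (pairwise_hamming_distance strings)

-- ===== LEMMAS AND PROOFS =====

theorem foldl_append_singleton {α β : Type} (f : β → α) :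
    ∀ (l : List β) (acc : List α), l.foldl (fun a x => a ++ [f x]) acc = acc ++ l.map f := by
  intro l
  induction l with
  | nil => simp
  | cons x xs ih => intro acc; simp [List.foldl, ih]

theorem hammingA_self (s : String) : hammingA s s = 0 := by
  unfold hammingA
  induction s.toList with
  | nil => simp
  | cons c cs ih => simpa using ih

theorem hammingA_comm (a b : String) : hammingA a b = hammingA b a := by
  unfold hammingA
  rw [← List.zip_swap a.toList b.toList, List.foldl_map]
  congr 1
  funext acc p
  by_cases h : p.1 = p.2 <;> simp [h, Ne, eq_comm]

theorem getD_map_range {α : Type} (f : Nat → α) (n j : Nat) (d : α) (h : j < n) :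
    ((List.range n).map f).getD j d = f j := by
  rw [List.getD_eq_getElem?_getD, List.getElem?_map, List.getElem?_range h]
  rfl

-- B's fold keeps the invariant: after the first k rows, the accumulator is A's first k rows.
theorem alt_invariant (strings : List String) :
    ∀ (k : Nat), k ≤ strings.length →
      (List.range k).foldl (fun rows i =>
        rows ++ [((List.range i).map (fun j => (rows.getD j []).getD i 0))
               ++ [0]
               ++ ((List.range' (i + 1) (strings.length - (i + 1))).map
                    (fun j => hammingA (strings.getD i "") (strings.getD j "")))]) []
      = (List.range k).map (fun i =>
          (List.range strings.length).map (fun j =>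
            hammingA (strings.getD i "") (strings.getD j ""))) := by
  intro k
  induction k with
  | zero => simp
  | succ k ih =>
    intro hk
    have hk' : k ≤ strings.length := Nat.le_of_succ_le hk
    have hkn : k < strings.length := hk
    rw [List.range_succ, List.foldl_append, List.map_append, ih hk']
    simp only [List.foldl_cons, List.foldl_nil]
    congr 1
    simp only [List.map_cons, List.map_nil]
    congr 1
    -- new row equals A's row k
    have hmirror : (List.range k).map (fun j =>
        (((List.range k).map (fun i => (List.range strings.length).map (fun j =>
          hammingA (strings.getD i "") (strings.getD j "")))).getD j []).getD k 0)
        = (List.range k).map (fun j => hammingA (strings.getD k "") (strings.getD j "")) := by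
      apply List.map_congr_left
      intro j hj
      have hjk : j < k := List.mem_range.mp hj
      rw [getD_map_range _ _ _ _ hjk, getD_map_range _ _ _ _ hkn,
        hammingA_comm]
    rw [hmirror]
    -- split A's row: range n = range k ++ [k] ++ range' (k+1) (n-k-1)
    have hsplit : List.range strings.length
        = List.range k ++ [k] ++ List.range' (k + 1) (strings.length - (k + 1)) := by
      have hr : strings.length = k + 1 + (strings.length - (k + 1)) := by omega
      rw [List.range_eq_range', hr, ← List.range'_append_1, List.range'_concat]
      simp [List.range_eq_range']
    rw [hsplit]
    simp only [List.map_append, List.map_cons, List.map_nil]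
    rw [hammingA_self]

-- ===== VERDICT (by name: the statement is the Claim_ definition above) =====
theorem pairwise_hamming_distance_spec : Claim_equal_pairwise_hamming_distance := by
  intro strings _ _
  unfold Spec_pairwise_hamming_distance pairwise_hamming_distance pairwise_hamming_distance_alt
  rw [alt_invariant strings strings.length (le_refl _)]
  rw [foldl_append_singleton]
  simp only [List.nil_append]
  apply List.map_congr_left
  intro i _
  rw [foldl_append_singleton]
  simp
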